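-- pv_equiv track=rewrite | github.com/allanj/Deductive-MWP | preprocess/preprocess_mathqa.py | replace_question
-- ===== SOURCE A (Python) =====
-- from typing import List, Tuple
--
-- def replace_question(problem_string:str ,  spans: List[Tuple]):
--     new_problem = []
--     current_num_idx = 0
--     current_span = spans[current_num_idx]
--     char_idx = 0
--     while char_idx < len(problem_string):
--         if current_span is not None and char_idx == current_span[0]:
--             new_problem.append(f" temp_{chr(ord('a') + current_num_idx)} ")
--             char_idx += current_span[1] - current_span[0]
--             current_num_idx += 1
--             current_span = spans[current_num_idx] if current_num_idx < len(spans) else None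
--             continue
--         else:
--             new_problem.append(problem_string[char_idx])
--         char_idx += 1
--     new_problem = ''.join(new_problem)
--     return new_problem
-- ===== SOURCE B (Python) =====
-- def replace_question(problem_string: str, spans):
--     parts = []
--     cursor = 0
--     n = len(problem_string)
--     for i, (start, end) in enumerate(spans):
--         if not (cursor <= start < n):
--             break
--         parts.append(problem_string[cursor:start])
--         parts.append(f" temp_{chr(ord('a') + i)} ")
--         cursor = end
--     parts.append(problem_string[cursor:])
--     return ''.join(parts)
-- ===== Notes on version B (the rewrite author's own statement) =====
-- stated objective: faster
-- what changed: B loops over the spans with a cursor, emitting whole string slices problem_string[cursor:start] and one placeholder per span (breaking at the first span the scan cannot reach), instead of A's character-by-character walk with per-char index arithmetic and list appends; the C-level slicing makes it measurably faster at the same O(len(s)+len(spans)) cost.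
-- outside the precondition, e.g. on replace_question('abc', [(0, -1)]): A returns ' temp_a cabc', B returns ' temp_a c'
import Mathlib
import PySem

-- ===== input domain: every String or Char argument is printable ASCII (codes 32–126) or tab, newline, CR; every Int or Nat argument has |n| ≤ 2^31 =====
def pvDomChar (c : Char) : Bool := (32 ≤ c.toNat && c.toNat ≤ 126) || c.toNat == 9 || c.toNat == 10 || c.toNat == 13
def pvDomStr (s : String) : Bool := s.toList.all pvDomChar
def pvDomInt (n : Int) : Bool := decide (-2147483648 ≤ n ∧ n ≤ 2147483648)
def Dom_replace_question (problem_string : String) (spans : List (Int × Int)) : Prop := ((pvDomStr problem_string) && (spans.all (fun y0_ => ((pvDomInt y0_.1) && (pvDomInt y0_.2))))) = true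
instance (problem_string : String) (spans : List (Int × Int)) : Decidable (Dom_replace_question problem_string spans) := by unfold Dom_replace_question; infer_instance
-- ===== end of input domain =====

-- B replaces A's character-by-character walk by one cursor pass over the spans emitting whole string slices (objective: faster; a timing run measured B faster on large inputs).

-- the f-string " temp_{chr(ord('a') + i)} " (shared formatting helper of both ports)
def pvTempTok (i : Nat) : List Char := (" temp_").toList ++ [Char.ofNat (97 + i)] ++ (" ").toList

-- ===== PORT A =====
-- A's while loop: state (num_idx, char_idx, acc); current_span is spans[num_idx] if in range else None
-- (A keeps that value in a variable; it equals spans[num_idx]? at every iteration once spans ≠ []).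
def pvGoA (s : List Char) (spans : List (Int × Int)) (num_idx : Nat) (char_idx : Int) (acc : List Char) : List Char :=
  if h : char_idx < (s.length : Int) then
    match hm : spans[num_idx]? with
    | some sp =>
      if char_idx = sp.1 then
        pvGoA s spans (num_idx + 1) (char_idx + (sp.2 - sp.1)) (acc ++ pvTempTok num_idx)
      else
        match PySem.List.pyGet? s char_idx with
        | some c => pvGoA s spans num_idx (char_idx + 1) (acc ++ [c])
        | none => acc          -- Python raises IndexError here (excluded by Pre_)
    | none =>
      match PySem.List.pyGet? s char_idx with
      | some c => pvGoA s spans num_idx (char_idx + 1) (acc ++ [c])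
      | none => acc            -- Python raises IndexError here (excluded by Pre_)
  else acc
termination_by (spans.length - num_idx, ((s.length : Int) - char_idx).toNat)
decreasing_by
  all_goals first
  | exact Prod.Lex.left _ _ (by obtain ⟨hlt, -⟩ := List.getElem?_eq_some_iff.mp hm; omega)
  | exact Prod.Lex.right _ (by omega)

def replace_question (problem_string : String) (spans : List (Int × Int)) : String :=
  match spans[0]? with
  | none => ""                 -- Python raises IndexError at 'spans[0]' (excluded by Pre_)
  | some _ => String.ofList (pvGoA problem_string.toList spans 0 0 [])

-- ===== PORT B =====
-- B's for loop over the spans with break, as structural recursion on the span list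
def pvGoB (s : List Char) (i : Nat) (cursor : Int) : List (Int × Int) → List (List Char)
  | [] => [PySem.List.slice s (some cursor) none]
  | (start, «end») :: rest =>
      if cursor ≤ start ∧ start < (s.length : Int) then
        PySem.List.slice s (some cursor) (some start) :: pvTempTok i :: pvGoB s (i + 1) «end» rest
      else
        [PySem.List.slice s (some cursor) none]

def replace_question_alt (problem_string : String) (spans : List (Int × Int)) : String :=
  String.ofList (pvGoB problem_string.toList 0 0 spans).flatten

-- ===== PRECONDITION & SPEC =====
-- Pre_ excludes spans = [] (A raises IndexError at spans[0]) and span lists whose scan can reach a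
-- negative span end — there A's char walk uses Python negative indexing (wraparound duplication, or
-- IndexError below -len); concretely: if the first span is reachable (0 ≤ start < len), all ends must be ≥ 0.
def Pre_replace_question (problem_string : String) (spans : List (Int × Int)) : Prop :=
  spans ≠ [] ∧
    (∀ p ∈ spans.head?,
      (0 ≤ p.1 ∧ p.1 < PySem.Str.len problem_string) → ∀ q ∈ spans, 0 ≤ q.2)
instance (problem_string : String) (spans : List (Int × Int)) : Decidable (Pre_replace_question problem_string spans) := by unfold Pre_replace_question; infer_instance

def pvWitness_replace_question : String × (List (Int × Int)) := ("ab cd x", [(0, 2), (3, 5)])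

def Spec_replace_question (problem_string : String) (spans : List (Int × Int)) (out : String) : Prop := out = replace_question_alt problem_string spans
instance (problem_string : String) (spans : List (Int × Int)) (out : String) : Decidable (Spec_replace_question problem_string spans out) := by unfold Spec_replace_question; infer_instance

-- ===== CLAIM (what is proved, stated in full; the proofs are below) =====
def Claim_equal_replace_question : Prop := ∀ (problem_string : String) (spans : List (Int × Int)), Dom_replace_question problem_string spans → Pre_replace_question problem_string spans → Spec_replace_question problem_string spans (replace_question problem_string spans)

-- ===== LEMMAS AND PROOFS =====

-- A's walk with no reachable span left copies the tail of the string
theorem pvGoA_tail (s : List Char) (spans : List (Int × Int)) (i : Nat)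
    (cursor : Int) (acc : List Char) (h0 : 0 ≤ cursor)
    (hb : ∀ p ∈ spans[i]?, p.1 < cursor ∨ (s.length : Int) ≤ p.1) :
    pvGoA s spans i cursor acc = acc ++ s.drop cursor.toNat := by
  rw [pvGoA]
  by_cases h : cursor < (s.length : Int)
  · have hlt : cursor.toNat < s.length := by omega
    have hget : PySem.List.pyGet? s cursor = some s[cursor.toNat] := by
      rw [PySem.List.pyGet?_of_nonneg s h0, List.getElem?_eq_getElem hlt]
    have hdrop : s.drop cursor.toNat = s[cursor.toNat] :: s.drop (cursor.toNat + 1) :=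
      List.drop_eq_getElem_cons hlt
    have hrec : pvGoA s spans i (cursor + 1) (acc ++ [s[cursor.toNat]]) =
        (acc ++ [s[cursor.toNat]]) ++ s.drop (cursor + 1).toNat :=
      pvGoA_tail s spans i (cursor + 1) (acc ++ [s[cursor.toNat]]) (by omega)
        (fun p hp => by rcases hb p hp with h' | h' <;> omega)
    have htn : (cursor + 1).toNat = cursor.toNat + 1 := by omega
    cases hm : spans[i]? with
    | none => simp only [h, dif_pos, hget, hrec, htn, hdrop]; simp
    | some p =>
        have hne : ¬ cursor = p.1 := by
          rcases hb p (by simp [hm]) with h' | h' <;> omega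
        simp only [h, dif_pos, hne, hget, hrec, htn, hdrop]
        simp
  · have : s.length ≤ cursor.toNat := by omega
    simp [h, List.drop_eq_nil_of_le this]
termination_by ((s.length : Int) - cursor).toNat
decreasing_by omega

-- A's walk up to the start of a reachable span emits the slice and the token and jumps to the end
theorem pvGoA_march (s : List Char) (spans : List (Int × Int)) (i : Nat) (st en : Int)
    (cursor : Int) (acc : List Char) (h0 : 0 ≤ cursor) (h1 : cursor ≤ st)
    (h2 : st < (s.length : Int)) (hm : spans[i]? = some (st, en)) :
    pvGoA s spans i cursor acc =
      pvGoA s spans (i + 1) en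
        (acc ++ (s.drop cursor.toNat).take (st.toNat - cursor.toNat) ++ pvTempTok i) := by
  have h : cursor < (s.length : Int) := by omega
  rw [pvGoA]
  simp only [h, dif_pos]
  by_cases he : cursor = st
  · subst he
    split
    · rename_i sp heq
      rw [hm] at heq
      injection heq with heq
      subst heq
      rw [if_pos rfl]
      have h3 : cursor + (en - cursor) = en := by ring
      simp [h3]
    · rename_i heq
      rw [hm] at heq
      cases heq
  · have hlt : cursor.toNat < s.length := by omega
    have hget : PySem.List.pyGet? s cursor = some s[cursor.toNat] := by
      rw [PySem.List.pyGet?_of_nonneg s h0, List.getElem?_eq_getElem hlt]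
    have hrec := pvGoA_march s spans i st en (cursor + 1) (acc ++ [s[cursor.toNat]])
      (by omega) (by omega) h2 hm
    have htn : (cursor + 1).toNat = cursor.toNat + 1 := by omega
    have htake : (s.drop cursor.toNat).take (st.toNat - cursor.toNat) =
        s[cursor.toNat] :: (s.drop (cursor.toNat + 1)).take (st.toNat - (cursor.toNat + 1)) := by
      rw [List.drop_eq_getElem_cons hlt]
      have h4 : st.toNat - cursor.toNat = (st.toNat - (cursor.toNat + 1)) + 1 := by omega
      rw [h4, List.take_succ_cons]
    rw [htn] at hrec
    split
    · rename_i sp heq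
      rw [hm] at heq
      injection heq with heq
      subst heq
      rw [if_neg he]
      simp only [hget]
      rw [hrec, htake]
      simp [List.append_assoc]
    · rename_i heq
      rw [hm] at heq
      cases heq
termination_by (st - cursor).toNat
decreasing_by omega

theorem pvMain (s : List Char) (spans : List (Int × Int)) (rest : List (Int × Int)) (i : Nat)
    (cursor : Int) (acc : List Char) (h0 : 0 ≤ cursor) (hd : spans.drop i = rest)
    (he : ∀ p ∈ rest, 0 ≤ p.2) :
    pvGoA s spans i cursor acc = acc ++ (pvGoB s i cursor rest).flatten := by
  induction rest generalizing i cursor acc with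
  | nil =>
      have hm : spans[i]? = none := by rw [← List.head?_drop, hd]; rfl
      rw [pvGoA_tail s spans i cursor acc h0 (by simp [hm]),
        pvGoB, PySem.List.slice_from s h0]
      simp
  | cons p rest ih =>
      obtain ⟨st, en⟩ := p
      have hm : spans[i]? = some (st, en) := by rw [← List.head?_drop, hd]; rfl
      have hd' : spans.drop (i + 1) = rest := by
        rw [← List.tail_drop, hd]; rfl
      by_cases hc : cursor ≤ st ∧ st < (s.length : Int)
      · have hen : (0:Int) ≤ en := he (st, en) (by simp)
        rw [pvGoA_march s spans i st en cursor acc h0 hc.1 hc.2 hm,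
          ih (i + 1) en _ hen hd' (fun q hq => he q (by simp [hq]))]
        rw [pvGoB, if_pos hc, PySem.List.slice_toNat s h0 (by omega)]
        simp
      · have hb : ∀ q ∈ spans[i]?, q.1 < cursor ∨ (s.length : Int) ≤ q.1 := by
          simp only [hm, Option.mem_def, Option.some.injEq]
          rintro q rfl
          omega
        rw [pvGoA_tail s spans i cursor acc h0 hb, pvGoB, if_neg hc,
          PySem.List.slice_from s h0]
        simp

-- ===== VERDICT (by name: the statement is the Claim_ definition above) =====
theorem replace_question_spec : Claim_equal_replace_question := by
  intro ps spans _hdom hpre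
  unfold Spec_replace_question replace_question replace_question_alt
  obtain ⟨hne, hends⟩ := hpre
  obtain ⟨⟨st, en⟩, t, rfl⟩ := List.exists_cons_of_ne_nil hne
  simp only [List.getElem?_cons_zero]
  by_cases hc : (0:Int) ≤ st ∧ st < (ps.toList.length : Int)
  · have hall : ∀ q ∈ (st, en) :: t, (0:Int) ≤ q.2 := by
      apply hends (st, en) (by simp)
      simpa [PySem.Str.len_eq] using hc
    rw [pvMain ps.toList ((st, en) :: t) ((st, en) :: t) 0 0 [] le_rfl (by simp) hall]
    simp
  · have hb : ∀ q ∈ ((st, en) :: t)[0]?, q.1 < (0:Int) ∨ (ps.toList.length : Int) ≤ q.1 := by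
      simp only [List.getElem?_cons_zero, Option.mem_def, Option.some.injEq]
      rintro q rfl
      omega
    rw [pvGoA_tail ps.toList ((st, en) :: t) 0 0 [] le_rfl hb]
    rw [pvGoB, if_neg (by omega), PySem.List.slice_from ps.toList le_rfl]
    simp
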